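-- pv_equiv track=rewrite | github.com/GumbleDorf/SomethingAwesomeCtfHash | hash.py | convertToWordArray
-- ===== SOURCE A (Python) =====
-- def newArray(num):
--     array=[]
--     for x in range(num):
--         array.append(0)
--     return array
--
-- def convertToWordArray(string):
--     lMessageLength=len(string)
--     lNumberOfWords_temp1=lMessageLength+8
--     lNumberOfWords_temp2=(lNumberOfWords_temp1-(lNumberOfWords_temp1%64))/64
--     lNumberOfWords=int((lNumberOfWords_temp2+1)*16)
--     lWordArray=newArray(lNumberOfWords-1)
--     lBytePosition=0
--     lByteCount=0
--     while lByteCount<lMessageLength: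
--         lWordCount=int((lByteCount-(lByteCount%4))/4)
--         lBytePosition=(lByteCount%4)*8
--         lWordArray[lWordCount]=(lWordArray[lWordCount]|(ord(string[int(lByteCount)])<<lBytePosition))
--         lByteCount+=1
--     lWordCount=int((lByteCount-(lByteCount%4))/4)
--     lBytePosition=(lByteCount%4)*8
--     lWordArray[lWordCount]=lWordArray[lWordCount]|(0x80<<lBytePosition)
--     lWordArray[lNumberOfWords-2]=lMessageLength<<3
--     lWordArray.append(lMessageLength>>29)
--     return lWordArray
-- ===== SOURCE B (Python) =====
-- def convertToWordArray(string):
--     n = len(string)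
--     numWords = ((n + 8) // 64 + 1) * 16
--     data = [ord(c) for c in string] + [0x80]
--     words = []
--     for w in range(numWords - 1):
--         chunk = data[4 * w:4 * w + 4]
--         word = 0
--         for i, v in enumerate(chunk):
--             word |= v << (8 * i)
--         words.append(word)
--     words[numWords - 2] = n << 3
--     words.append(n >> 29)
--     return words
-- ===== Notes on version B (the rewrite author's own statement) =====
-- stated objective: faster
-- what changed: B builds the padded word array word-by-word, assembling each 32-bit word directly from its up-to-four source bytes of the code-point list plus the 0x80 sentinel, instead of A's byte-by-byte loop that ORs into a preallocated zero array via per-byte index reads and writes.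
import Mathlib
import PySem

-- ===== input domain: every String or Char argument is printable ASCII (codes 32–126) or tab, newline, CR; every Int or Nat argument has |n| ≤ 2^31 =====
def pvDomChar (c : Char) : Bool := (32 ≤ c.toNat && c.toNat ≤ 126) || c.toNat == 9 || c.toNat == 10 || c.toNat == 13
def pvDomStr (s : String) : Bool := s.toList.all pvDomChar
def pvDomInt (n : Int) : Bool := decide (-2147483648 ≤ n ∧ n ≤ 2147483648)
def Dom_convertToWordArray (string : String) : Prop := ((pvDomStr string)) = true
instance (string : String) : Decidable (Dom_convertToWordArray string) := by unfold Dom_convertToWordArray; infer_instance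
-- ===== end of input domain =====

-- B builds the array word-by-word (each 32-bit word assembled from its up-to-four source
-- bytes) instead of A's byte-by-byte in-place OR loop; objective: idiomatic/alternative.
-- All intermediate Python ints here are provably nonnegative, so both ports compute in Nat
-- and cast to Int at the very end (Python's // and % on nonnegative ints = Nat `/` and `%`).

-- ===== PORT A =====
def newArray (num : Nat) : List Nat :=
  (List.range num).foldl (fun array _ => array ++ [0]) []

def convertToWordArray (string : String) : List Int :=
  let s := string.toList
  let lMessageLength := s.length
  let t1 := lMessageLength + 8
  let t2 := (t1 - t1 % 64) / 64
  let lNumberOfWords := (t2 + 1) * 16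
  let arr0 := newArray (lNumberOfWords - 1)
  -- while lByteCount < lMessageLength — loop counter k = lByteCount; indices are always
  -- in range (proved in the lemmas below), so getD/set read/write exactly as Python does
  let arr1 := (List.range lMessageLength).foldl
      (fun a k =>
        let wc := (k - k % 4) / 4
        let bp := (k % 4) * 8
        a.set wc ((a.getD wc 0) ||| ((s.getD k ' ').toNat <<< bp))) arr0
  let wc := (lMessageLength - lMessageLength % 4) / 4
  let bp := (lMessageLength % 4) * 8
  let arr2 := arr1.set wc ((arr1.getD wc 0) ||| (0x80 <<< bp))
  let arr3 := arr2.set (lNumberOfWords - 2) (lMessageLength <<< 3)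
  (arr3 ++ [lMessageLength >>> 29]).map (fun x => (x : Int))

-- ===== PORT B =====
def convertToWordArray_alt (string : String) : List Int :=
  let s := string.toList
  let n := s.length
  let numWords := ((n + 8) / 64 + 1) * 16
  let data := s.map (fun c => c.toNat) ++ [0x80]
  let words := (List.range (numWords - 1)).map (fun w =>
      (((data.drop (4 * w)).take 4).zipIdx).foldl
        (fun acc vi => acc ||| (vi.1 <<< (8 * vi.2))) 0)
  let words := words.set (numWords - 2) (n <<< 3)
  (words ++ [n >>> 29]).map (fun x => (x : Int))

-- ===== PRECONDITION & SPEC =====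
def Spec_convertToWordArray (string : String) (out : List Int) : Prop := out = convertToWordArray_alt string
instance (string : String) (out : List Int) : Decidable (Spec_convertToWordArray string out) := by unfold Spec_convertToWordArray; infer_instance

-- ===== CLAIM (what is proved, stated in full; the proofs are below) =====
def Claim_equal_convertToWordArray : Prop := ∀ (string : String), Dom_convertToWordArray string → Spec_convertToWordArray string (convertToWordArray string)

-- ===== LEMMAS AND PROOFS =====

-- A's body value of one word: OR of the bytes of data falling into word w
def chunkWord (data : List Nat) (w : Nat) : Nat :=
  (((data.drop (4 * w)).take 4).zipIdx).foldl
    (fun acc vi => acc ||| (vi.1 <<< (8 * vi.2))) 0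

def step (data : List Nat) (a : List Nat) (k : Nat) : List Nat :=
  a.set (k / 4) ((a.getD (k / 4) 0) ||| ((data.getD k 0) <<< ((k % 4) * 8)))

lemma newArray_eq (k : Nat) : newArray k = List.replicate k 0 := by
  unfold newArray
  induction k with
  | zero => simp
  | succ n ih =>
      rw [List.range_succ, List.foldl_append, ih, List.foldl_cons, List.foldl_nil,
        List.replicate_succ']

lemma chunk_fold_append (c : List Nat) (x acc : Nat) :
    ((c ++ [x]).zipIdx).foldl (fun acc vi => acc ||| (vi.1 <<< (8 * vi.2))) acc
      = (c.zipIdx.foldl (fun acc vi => acc ||| (vi.1 <<< (8 * vi.2))) acc) ||| (x <<< (8 * c.length)) := by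
  rw [List.zipIdx_append, List.foldl_append]
  simp

lemma chunkWord_stable (data : List Nat) (m w : Nat) (hw : w ≠ m / 4) :
    chunkWord (data.take (m + 1)) w = chunkWord (data.take m) w := by
  unfold chunkWord
  rw [List.drop_take, List.drop_take, List.take_take, List.take_take]
  have : min 4 (m + 1 - 4 * w) = min 4 (m - 4 * w) := by omega
  rw [this]

lemma chunkWord_grow (data : List Nat) (m : Nat) (hm : m < data.length) :
    chunkWord (data.take (m + 1)) (m / 4)
      = chunkWord (data.take m) (m / 4) ||| ((data.getD m 0) <<< ((m % 4) * 8)) := by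
  unfold chunkWord
  rw [List.drop_take, List.drop_take, List.take_take, List.take_take]
  have h1 : min 4 (m + 1 - 4 * (m / 4)) = m % 4 + 1 := by omega
  have h2 : min 4 (m - 4 * (m / 4)) = m % 4 := by omega
  rw [h1, h2]
  have hlen : m % 4 < (data.drop (4 * (m / 4))).length := by
    rw [List.length_drop]; omega
  have htake : (data.drop (4 * (m / 4))).take (m % 4 + 1)
      = (data.drop (4 * (m / 4))).take (m % 4) ++ [(data.drop (4 * (m / 4)))[m % 4]'hlen] := by
    rw [List.take_add_one, List.getElem?_eq_getElem hlen]; rfl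
  rw [htake, chunk_fold_append]
  have hlen2 : ((data.drop (4 * (m / 4))).take (m % 4)).length = m % 4 := by
    rw [List.length_take, List.length_drop]; omega
  have hget : (data.drop (4 * (m / 4)))[m % 4]'hlen = data.getD m 0 := by
    rw [List.getElem_drop, List.getD_eq_getElem _ _ (by omega)]
    congr 1; omega
  rw [hlen2, hget, Nat.mul_comm 8 (m % 4)]

lemma fold_step_eq (data : List Nat) (L m : Nat) (hm : m ≤ data.length) (hL : m ≤ 4 * L) :
    (List.range m).foldl (step data) (List.replicate L 0)
      = (List.range L).map (chunkWord (data.take m)) := by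
  induction m with
  | zero =>
      apply List.ext_getElem
      · simp
      · intro i h1 h2
        simp [chunkWord]
  | succ m ih =>
      rw [List.range_succ, List.foldl_append, ih (by omega) (by omega),
        List.foldl_cons, List.foldl_nil]
      unfold step
      have hwL : m / 4 < L := by omega
      apply List.ext_getElem
      · simp
      · intro i h1 h2
        simp only [List.length_map, List.length_range] at h2
        rw [List.getElem_set]
        simp only [List.getElem_map, List.getElem_range]
        by_cases hi : m / 4 = i
        · rw [if_pos hi]
          subst hi
          rw [chunkWord_grow data m (by omega)]
          congr 1
          rw [List.getD_eq_getElem _ _ (by simp [hwL]), List.getElem_map, List.getElem_range]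
        · rw [if_neg hi, chunkWord_stable data m i (fun h => hi h.symm)]

-- A's per-byte update written with (k - k % 4) / 4 is step over data = bytes ++ [0x80]
lemma arr1_eq (s : List Char) (L : Nat) (hL : s.length + 1 ≤ 4 * L) :
    ((List.range (s.length + 1)).foldl (step (s.map (fun c => c.toNat) ++ [0x80]))
        (List.replicate L 0))
      = (List.range L).map (chunkWord (s.map (fun c => c.toNat) ++ [0x80])) := by
  have h := fold_step_eq (s.map (fun c => c.toNat) ++ [0x80]) L (s.length + 1)
    (by simp) hL
  rw [h, List.take_of_length_le (by simp)]

lemma step_data_lt (s : List Char) (a : List Nat) (k : Nat) (hk : k < s.length) :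
    step (s.map (fun c => c.toNat) ++ [0x80]) a k
      = a.set ((k - k % 4) / 4) ((a.getD ((k - k % 4) / 4) 0) ||| ((s.getD k ' ').toNat <<< ((k % 4) * 8))) := by
  unfold step
  have h4 : (k - k % 4) / 4 = k / 4 := by omega
  rw [h4]
  congr 2
  rw [List.getD_append _ _ _ _ (by simpa using hk), List.getD_eq_getElem _ _ (by simpa using hk),
    List.getD_eq_getElem _ _ hk, List.getElem_map]

-- ===== VERDICT (by name: the statement is the Claim_ definition above) =====
theorem convertToWordArray_spec : Claim_equal_convertToWordArray := by
  intro string _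
  unfold Spec_convertToWordArray convertToWordArray convertToWordArray_alt
  simp only []
  set s := string.toList with hs
  set n := s.length with hn
  set data : List Nat := s.map (fun c => c.toNat) ++ [0x80] with hdata
  -- the two word counts agree
  have hW : ((n + 8) - (n + 8) % 64) / 64 + 1 = (n + 8) / 64 + 1 := by omega
  set L : Nat := (((n + 8) - (n + 8) % 64) / 64 + 1) * 16 - 1 with hLdef
  have hL : n + 1 ≤ 4 * L := by
    have : (n + 8) % 64 < 64 := Nat.mod_lt _ (by omega)
    omega
  -- A's loop + sentinel step = fold of `step data` over range (n+1)
  have hloop :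
      ((List.range n).foldl
        (fun a k =>
          a.set ((k - k % 4) / 4)
            ((a.getD ((k - k % 4) / 4) 0) ||| ((s.getD k ' ').toNat <<< ((k % 4) * 8))))
        (newArray L))
      = (List.range n).foldl (step data) (List.replicate L 0) := by
    rw [newArray_eq]
    refine (PySem.List.foldl_congr_mem _ _ _ _ ?_).symm
    intro a k hk
    rw [step_data_lt s a k (by simpa using hk)]
  have hsent : ∀ (a : List Nat),
      a.set ((n - n % 4) / 4) ((a.getD ((n - n % 4) / 4) 0) ||| (0x80 <<< ((n % 4) * 8)))
        = step data a n := by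
    intro a
    unfold step
    have h4 : (n - n % 4) / 4 = n / 4 := by omega
    have hget : data.getD n 0 = 0x80 := by
      rw [hdata, List.getD_eq_getElem _ _ (by simp [hn]),
        List.getElem_append_right (by simp [hn])]
      simp [hn]
    rw [h4, hget]
  have hfold : (List.range (n + 1)).foldl (step data) (List.replicate L 0)
      = (List.range L).map (chunkWord data) := by
    have := arr1_eq s L hL
    rwa [← hn, ← hdata] at this
  have hcomb : step data ((List.range n).foldl (step data) (List.replicate L 0)) n
      = (List.range (n + 1)).foldl (step data) (List.replicate L 0) := by
    rw [List.range_succ, List.foldl_append, List.foldl_cons, List.foldl_nil]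
  rw [hloop, hsent, hcomb, hfold, hW]
  simp only [hLdef, hW]
  rfl
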